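-- pv_equiv track=rewrite | github.com/gatherheart/Solved_PS | 2019_NAVER_2.py | solution
-- ===== SOURCE A (Python) =====
-- from collections import defaultdict, deque
--
-- OFFSET = [[-1, 0], [0, 1], [1, 0], [0, -1]]
--
-- EMPTY = "."
--
-- def is_overflow(x, y, M, N):
--     return x < 0 or y < 0 or x >= M or y >= N
--
-- def solution(maps):
--
--     M, N = len(maps), len(maps[0])
--     new_maps = []
--     attached = defaultdict(set)
--
--     for _map in maps:
--         new_maps.append(list(_map))
--
--     for i in range(M):
--         for j in range(N):
--             if new_maps[i][j] == EMPTY: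
--                 continue
--
--             # start BFS
--             nation = new_maps[i][j]
--             queue = deque([(i, j)])
--             visited = defaultdict(bool)
--             visited[(i, j)] = True
--             new_maps[i][j] = EMPTY
--
--             while queue:
--
--                 x, y = queue.popleft()
--
--                 for _dir in range(len(OFFSET)):
--                     new_x = x + OFFSET[_dir][0]
--                     new_y = y + OFFSET[_dir][1]
--
--                     if is_overflow(new_x, new_y, M, N) or \
--                         new_maps[new_x][new_y] == EMPTY:
--                         continue
--
--                     if nation != new_maps[new_x][new_y]:
--                         nation_key, nation_val = sorted([nation, new_maps[new_x][new_y]])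
--                         attached[nation_key].add(nation_val)
--                         continue
--
--                     if not visited[(new_x, new_y)]:
--                         queue.append((new_x, new_y))
--                         visited[(new_x, new_y)] = True
--                         new_maps[x][y] = EMPTY
--
--
--     max_attached = 0
--     count = 0
--
--     for _key in attached:
--         max_attached = max(max_attached, len(attached[_key]))
--         count += len(attached[_key])
--
--     return [count, max_attached]
-- ===== SOURCE B (Python) =====
-- def solution(maps):
--     M, N = len(maps), len(maps[0])
--     adj = {}
--     for i in range(M):
--         for j in range(N):
--             a = maps[i][j]
--             if a == '.':
--                 continue
--             for x, y in ((i, j + 1), (i + 1, j)):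
--                 if x < M and y < N:
--                     b = maps[x][y]
--                     if b != '.' and b != a:
--                         k, v = (a, b) if a <= b else (b, a)
--                         adj.setdefault(k, set()).add(v)
--     count = sum(len(s) for s in adj.values())
--     max_attached = max((len(s) for s in adj.values()), default=0)
--     return [count, max_attached]
-- ===== Notes on version B (the rewrite author's own statement) =====
-- stated objective: faster
-- what changed: Replaces the mutating flood-fill (deque BFS per region with a visited dict and in-place grid emptying) by a single non-mutating double scan that records each adjacent differing-label pair once via right/down neighbour checks into a dict of sets.
import Mathlib
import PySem

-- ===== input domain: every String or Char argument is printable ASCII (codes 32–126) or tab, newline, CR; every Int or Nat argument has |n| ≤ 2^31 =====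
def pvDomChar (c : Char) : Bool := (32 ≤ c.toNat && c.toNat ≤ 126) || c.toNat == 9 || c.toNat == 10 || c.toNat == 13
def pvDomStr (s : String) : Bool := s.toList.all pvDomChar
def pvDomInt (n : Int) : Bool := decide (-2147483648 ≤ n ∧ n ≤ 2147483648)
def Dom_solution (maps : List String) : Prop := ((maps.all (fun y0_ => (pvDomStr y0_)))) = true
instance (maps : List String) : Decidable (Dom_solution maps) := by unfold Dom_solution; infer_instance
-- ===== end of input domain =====

-- B replaces A's mutating per-region BFS (deque + visited dict + grid emptying) by one
-- non-mutating scan recording each adjacent differing-label pair via right/down neighbours;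
-- A copies its argument rows before mutating, so neither version mutates the argument.

-- ===== PORT A =====
-- shared low-level grid accessors (index arithmetic only; both Pythons index nested lists/strings)
def gget (grid : List (List Char)) (x y : Int) : Char :=
  (grid.getD x.toNat []).getD y.toNat '?'

def gset (grid : List (List Char)) (x y : Int) (c : Char) : List (List Char) :=
  grid.set x.toNat ((grid.getD x.toNat []).set y.toNat c)

-- sorted([a, b]) on two one-character strings
def sort2 (a b : Char) : Char × Char := if a ≤ b then (a, b) else (b, a)

def OFFSET : List (Int × Int) := [(-1, 0), (0, 1), (1, 0), (0, -1)]

def isOverflow (x y mi ni : Int) : Bool :=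
  decide (x < 0) || decide (y < 0) || decide (mi ≤ x) || decide (ni ≤ y)

-- attached[k].add(v) where attached is a defaultdict(set) and [k, v] = sorted([a, b])
def recordPair (attached : PySem.Dict Char (PySem.Set Char)) (a b : Char) :
    PySem.Dict Char (PySem.Set Char) :=
  let kv := sort2 a b
  attached.insert kv.1 (PySem.Set.add (attached.getD kv.1 PySem.Set.empty) kv.2)

-- the body of A's inner 'for _dir in range(len(OFFSET))' loop, one direction
def stepDir (nation : Char) (mi ni x y : Int)
    (st : List (List Char) × PySem.Dict Char (PySem.Set Char) × List (Int × Int) ×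
      PySem.Dict (Int × Int) Bool)
    (off : Int × Int) :
    List (List Char) × PySem.Dict Char (PySem.Set Char) × List (Int × Int) ×
      PySem.Dict (Int × Int) Bool :=
  let (grid, attached, queue, visited) := st
  let nx := x + off.1
  let ny := y + off.2
  if isOverflow nx ny mi ni || (gget grid nx ny == '.') then st
  else if nation ≠ gget grid nx ny then
    (grid, recordPair attached nation (gget grid nx ny), queue, visited)
  else if visited.getD (nx, ny) false then st
  else (gset grid x y '.', attached, queue ++ [(nx, ny)], visited.insert (nx, ny) true)

-- A's 'while queue' loop (fuel-bounded; the fuel passed in cellStep always suffices)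
def bfsLoop (nation : Char) (mi ni : Int) :
    Nat → List (List Char) × PySem.Dict Char (PySem.Set Char) × List (Int × Int) ×
      PySem.Dict (Int × Int) Bool →
    List (List Char) × PySem.Dict Char (PySem.Set Char) × List (Int × Int) ×
      PySem.Dict (Int × Int) Bool
  | 0, st => st
  | fuel + 1, (grid, attached, queue, visited) =>
    match queue with
    | [] => (grid, attached, [], visited)
    | (x, y) :: rest =>
      bfsLoop nation mi ni fuel
        (OFFSET.foldl (stepDir nation mi ni x y) (grid, attached, rest, visited))

-- the body of A's outer double loop for one cell (i, j)
def cellStep (mi ni : Int)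
    (st : List (List Char) × PySem.Dict Char (PySem.Set Char)) (i j : Int) :
    List (List Char) × PySem.Dict Char (PySem.Set Char) :=
  if gget st.1 i j == '.' then st
  else
    let nation := gget st.1 i j
    let visited : PySem.Dict (Int × Int) Bool := PySem.Dict.empty.insert (i, j) true
    let r := bfsLoop nation mi ni (mi.toNat * ni.toNat + 1)
      (gset st.1 i j '.', st.2, [(i, j)], visited)
    (r.1, r.2.1)

def solution (maps : List String) : List Int :=
  let mi : Int := maps.length
  let ni : Int := ((maps.getD 0 "").toList.length : Int)
  let grid : List (List Char) := maps.map (fun s => s.toList)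
  let fin := (PySem.List.pyRange 0 mi 1).foldl (fun st i =>
      (PySem.List.pyRange 0 ni 1).foldl (fun st2 j => cellStep mi ni st2 i j) st)
    (grid, (PySem.Dict.empty : PySem.Dict Char (PySem.Set Char)))
  let tally := fin.2.keys.foldl
    (fun (cm : Int × Int) k =>
      (cm.1 + ((fin.2.getD k PySem.Set.empty).length : Int),
       max cm.2 ((fin.2.getD k PySem.Set.empty).length : Int)))
    (0, 0)
  [tally.1, tally.2]

-- ===== PORT B =====
def solution_alt (maps : List String) : List Int :=
  let mi : Int := maps.length
  let ni : Int := ((maps.getD 0 "").toList.length : Int)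
  let grid : List (List Char) := maps.map (fun s => s.toList)
  let adj := (PySem.List.pyRange 0 mi 1).foldl (fun d i =>
      (PySem.List.pyRange 0 ni 1).foldl (fun d2 j =>
        let a := gget grid i j
        if a == '.' then d2
        else [(i, j + 1), (i + 1, j)].foldl (fun d3 (xy : Int × Int) =>
          if decide (xy.1 < mi) && decide (xy.2 < ni) then
            let b := gget grid xy.1 xy.2
            if b ≠ '.' ∧ b ≠ a then
              let kv := sort2 a b
              d3.insert kv.1 (PySem.Set.add (d3.getD kv.1 PySem.Set.empty) kv.2)
            else d3
          else d3) d2) d)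
    (PySem.Dict.empty : PySem.Dict Char (PySem.Set Char))
  let lens : List Int := adj.values.map (fun s => (s.length : Int))
  [lens.sum, (PySem.List.max? lens (fun x => x)).getD 0]

-- ===== PRECONDITION & SPEC =====
-- Pre_ admits exactly the inputs on which the Python A returns: maps nonempty (A reads
-- maps[0]) and every row at least as long as row 0 (A indexes every row at columns
-- 0..len(maps[0])-1 and raises IndexError on a shorter row; B raises there too).
def Pre_solution (maps : List String) : Prop :=
  maps ≠ [] ∧ ∀ s ∈ maps, (maps.headD "").toList.length ≤ s.toList.length
instance (maps : List String) : Decidable (Pre_solution maps) := by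
  unfold Pre_solution; infer_instance

def pvWitness_solution : List String := ["ab", "cc"]

def Spec_solution (maps : List String) (out : List Int) : Prop := out = solution_alt maps
instance (maps : List String) (out : List Int) : Decidable (Spec_solution maps out) := by unfold Spec_solution; infer_instance

-- ===== CLAIM (what is proved, stated in full; the proofs are below) =====
def Claim_equal_solution : Prop := ∀ (maps : List String), Dom_solution maps → Pre_solution maps → Spec_solution maps (solution maps)

-- ===== LEMMAS AND PROOFS =====

-- ---------- abstract notions ----------

def InW (mi ni : Int) (p : Int × Int) : Prop := 0 ≤ p.1 ∧ p.1 < mi ∧ 0 ≤ p.2 ∧ p.2 < ni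

def Adj (p q : Int × Int) : Prop := ∃ off ∈ OFFSET, q = (p.1 + off.1, p.2 + off.2)

def RelP (g : List (List Char)) (mi ni : Int) (k v : Char) : Prop :=
  k < v ∧ k ≠ '.' ∧ v ≠ '.' ∧
    ∃ p q, InW mi ni p ∧ InW mi ni q ∧ Adj p q ∧ gget g p.1 p.2 = k ∧ gget g q.1 q.2 = v

def DMem (d : PySem.Dict Char (PySem.Set Char)) (k v : Char) : Prop :=
  v ∈ d.getD k PySem.Set.empty

def GoodDict (d : PySem.Dict Char (PySem.Set Char)) : Prop :=
  d.keys.Nodup ∧ (∀ k, k ∈ d.keys ↔ d.getD k PySem.Set.empty ≠ []) ∧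
    ∀ k, (d.getD k PySem.Set.empty).Nodup

def GridOk (g : List (List Char)) (mi ni : Int) : Prop :=
  g.length = mi.toNat ∧ ∀ i : Nat, i < g.length → ni.toNat ≤ (g.getD i []).length

def DimOk (g grid : List (List Char)) : Prop :=
  grid.length = g.length ∧ ∀ i : Nat, (grid.getD i []).length = (g.getD i []).length

def winList (mi ni : Int) : List (Int × Int) :=
  (((List.range mi.toNat).product (List.range ni.toNat)).map
    (fun p => ((p.1 : Int), (p.2 : Int))))

def unv (mi ni : Int) (vis : PySem.Dict (Int × Int) Bool) : Nat :=
  (winList mi ni).countP (fun p => vis.getD p false == false)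

-- ---------- small facts ----------

lemma adj_symm {p q : Int × Int} (h : Adj p q) : Adj q p := by
  obtain ⟨off, hoff, rfl⟩ := h
  simp only [OFFSET, List.mem_cons, List.not_mem_nil, or_false] at hoff
  rcases hoff with rfl | rfl | rfl | rfl
  · exact ⟨(1, 0), by simp [OFFSET], by simp⟩
  · exact ⟨(0, -1), by simp [OFFSET], by simp⟩
  · exact ⟨(-1, 0), by simp [OFFSET], by simp⟩
  · exact ⟨(0, 1), by simp [OFFSET], by simp⟩

lemma mem_winList {mi ni : Int} {p : Int × Int} : p ∈ winList mi ni ↔ InW mi ni p := by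
  unfold winList InW
  constructor
  · rintro h
    simp only [List.mem_map] at h
    obtain ⟨q, hq, rfl⟩ := h
    rw [List.pair_mem_product] at hq
    simp only [List.mem_range] at hq
    constructor
    · positivity
    refine ⟨?_, by positivity, ?_⟩ <;> omega
  · rintro ⟨h1, h2, h3, h4⟩
    simp only [List.mem_map]
    refine ⟨(p.1.toNat, p.2.toNat), ?_, ?_⟩
    · rw [List.pair_mem_product]
      simp only [List.mem_range]
      omega
    · simp only
      rw [Int.toNat_of_nonneg h1, Int.toNat_of_nonneg h3]

lemma nodup_winList {mi ni : Int} : (winList mi ni).Nodup := by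
  unfold winList
  refine List.Nodup.map ?_ (List.Nodup.product (List.nodup_range) (List.nodup_range))
  intro a b h
  simp only [Prod.mk.injEq] at h
  exact Prod.ext (by exact_mod_cast h.1) (by exact_mod_cast h.2)

lemma length_winList {mi ni : Int} : (winList mi ni).length = mi.toNat * ni.toNat := by
  unfold winList
  show (((List.range mi.toNat) ×ˢ (List.range ni.toNat)).map
    (fun p => ((p.1 : Int), (p.2 : Int)))).length = _
  rw [List.length_map, List.length_product, List.length_range, List.length_range]

lemma unv_insert {mi ni : Int} {vis : PySem.Dict (Int × Int) Bool} {q : Int × Int}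
    (hq : InW mi ni q) (hf : vis.getD q false = false) :
    unv mi ni (vis.insert q true) + 1 = unv mi ni vis := by
  unfold unv
  have hmem : q ∈ winList mi ni := mem_winList.mpr hq
  have hperm := List.perm_cons_erase hmem
  rw [hperm.countP_eq, hperm.countP_eq]
  have hnq : q ∉ (winList mi ni).erase q :=
    (nodup_winList (mi := mi) (ni := ni)).not_mem_erase
  have hcongr : ∀ f : PySem.Dict (Int × Int) Bool,
      ((winList mi ni).erase q).countP (fun p => (vis.insert q true).getD p false == false) =
      ((winList mi ni).erase q).countP (fun p => vis.getD p false == false) := by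
    intro _
    apply List.countP_congr
    intro p hp
    have hpq : p ≠ q := fun h => hnq (h ▸ hp)
    rw [PySem.Dict.getD_insert_of_ne _ _ _ hpq]
  rw [List.countP_cons, List.countP_cons]
  rw [hcongr vis]
  rw [PySem.Dict.getD_insert_self, hf]
  simp

lemma unv_bound {mi ni : Int} {vis : PySem.Dict (Int × Int) Bool} {r : Int × Int}
    (hr : InW mi ni r) (ht : vis.getD r false = true) :
    unv mi ni vis + 1 ≤ mi.toNat * ni.toNat := by
  unfold unv
  have hmem : r ∈ winList mi ni := mem_winList.mpr hr
  have hperm := List.perm_cons_erase hmem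
  rw [hperm.countP_eq, List.countP_cons, ht]
  have h1 : ((winList mi ni).erase r).countP (fun p => vis.getD p false == false) ≤
      ((winList mi ni).erase r).length := List.countP_le_length
  have h2 : ((winList mi ni).erase r).length = (winList mi ni).length - 1 :=
    List.length_erase_of_mem hmem
  have h3 : (winList mi ni).length = mi.toNat * ni.toNat := length_winList
  have h4 : 1 ≤ (winList mi ni).length := List.length_pos_of_mem hmem
  simp only [show ((true == false) = true) = False by simp, if_false]
  omega

lemma sort2_cases (a b : Char) (h : a ≠ b) :
    (sort2 a b = (a, b) ∧ a < b) ∨ (sort2 a b = (b, a) ∧ b < a) := by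
  unfold sort2
  rcases lt_or_gt_of_ne h with h1 | h1
  · left; simp [le_of_lt h1, h1]
  · right; rw [if_neg (by exact not_le_of_gt h1)]; exact ⟨rfl, h1⟩

lemma sort2_comm (a b : Char) (h : a ≠ b) : sort2 a b = sort2 b a := by
  unfold sort2
  rcases lt_or_gt_of_ne h with hl | hl
  · rw [if_pos hl.le, if_neg (not_le.mpr hl)]
  · rw [if_neg (not_le.mpr hl), if_pos hl.le]

lemma sort2_of_lt {a b : Char} (h : a < b) : sort2 a b = (a, b) := by
  unfold sort2; rw [if_pos h.le]

lemma isOverflow_iff {x y mi ni : Int} :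
    isOverflow x y mi ni = false ↔ InW mi ni (x, y) := by
  unfold isOverflow InW
  simp
  omega

-- ---------- grid lemmas ----------

lemma length_gset (grid : List (List Char)) (x y : Int) (c : Char) :
    (gset grid x y c).length = grid.length := by
  unfold gset; simp

lemma rowlen_gset (grid : List (List Char)) (x y : Int) (c : Char) (i : Nat) :
    ((gset grid x y c).getD i []).length = ((grid.getD i []).length) := by
  unfold gset
  rw [List.getD_eq_getElem?_getD, List.getD_eq_getElem?_getD, List.getElem?_set]
  by_cases h : x.toNat = i
  · subst h
    by_cases h2 : x.toNat < grid.length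
    · simp [h2, List.getD_eq_getElem?_getD]
    · simp [h2]
  · simp [h]

lemma gget_gset_self {grid : List (List Char)} {x y : Int} {c : Char}
    (hxr : x.toNat < grid.length) (hyr : y.toNat < (grid.getD x.toNat []).length) :
    gget (gset grid x y c) x y = c := by
  unfold gget gset
  simp only [List.getD_eq_getElem?_getD, List.getElem?_set, hxr, if_true,
    Option.getD_some]
  rw [List.getD_eq_getElem?_getD] at hyr
  simp [hyr]


lemma gget_gset_ne {grid : List (List Char)} {x y x' y' : Int} {c : Char}
    (hx : 0 ≤ x) (hy : 0 ≤ y) (hx' : 0 ≤ x') (hy' : 0 ≤ y')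
    (hne : (x', y') ≠ (x, y)) :
    gget (gset grid x y c) x' y' = gget grid x' y' := by
  unfold gget gset
  simp only [List.getD_eq_getElem?_getD, List.getElem?_set]
  by_cases hxx : x.toNat = x'.toNat
  · have hyy : y.toNat ≠ y'.toNat := by
      intro hcon
      exact hne (by rw [Prod.mk.injEq]; omega)
    simp only [hxx]
    by_cases hlt : x'.toNat < grid.length
    · simp only [hlt, if_true, Option.getD_some, List.getElem?_set, hyy, if_false]
    · simp [hlt]
  · simp only [hxx, if_false]

lemma dim_gset {g grid : List (List Char)} (h : DimOk g grid) (x y : Int) (c : Char) :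
    DimOk g (gset grid x y c) := by
  obtain ⟨h1, h2⟩ := h
  exact ⟨by rw [length_gset, h1], fun i => by rw [rowlen_gset]; exact h2 i⟩

lemma inW_bounds {g grid : List (List Char)} {mi ni : Int} {p : Int × Int}
    (hg : GridOk g mi ni) (hd : DimOk g grid) (hp : InW mi ni p) :
    p.1.toNat < grid.length ∧ p.2.toNat < (grid.getD p.1.toNat []).length := by
  obtain ⟨hg1, hg2⟩ := hg
  obtain ⟨hd1, hd2⟩ := hd
  obtain ⟨ha, hb, hc, he⟩ := hp
  constructor
  · omega
  · rw [hd2]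
    have := hg2 p.1.toNat (by omega)
    omega

-- ---------- dict lemmas ----------

lemma dmem_addPair {att : PySem.Dict Char (PySem.Set Char)} {a k v : Char}
    {s : Char} :
    DMem (att.insert a (PySem.Set.add (att.getD a PySem.Set.empty) s)) k v ↔
      DMem att k v ∨ (k, v) = (a, s) := by
  unfold DMem
  by_cases h : k = a
  · subst h
    rw [PySem.Dict.getD_insert_self, PySem.Set.mem_add]
    constructor
    · rintro (h | rfl)
      · exact Or.inl h
      · exact Or.inr rfl
    · rintro (h | h)
      · exact Or.inl h
      · injection h with h1 h2
        subst h2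
        exact Or.inr rfl
  · rw [PySem.Dict.getD_insert_of_ne _ _ _ h]
    constructor
    · exact Or.inl
    · rintro (hh | hh)
      · exact hh
      · exact absurd (congrArg Prod.fst hh) h

lemma dmem_recordPair {att : PySem.Dict Char (PySem.Set Char)} {a b k v : Char} :
    DMem (recordPair att a b) k v ↔ DMem att k v ∨ (k, v) = sort2 a b := by
  have hrp : recordPair att a b = att.insert (sort2 a b).1
      (PySem.Set.add (att.getD (sort2 a b).1 PySem.Set.empty) (sort2 a b).2) := rfl
  rw [hrp, dmem_addPair, Prod.mk.eta]

lemma good_addPair {att : PySem.Dict Char (PySem.Set Char)} (h : GoodDict att)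
    (a s : Char) :
    GoodDict (att.insert a (PySem.Set.add (att.getD a PySem.Set.empty) s)) := by
  obtain ⟨h1, h2, h3⟩ := h
  refine ⟨PySem.Dict.nodup_keys_insert _ _ _ h1, ?_, ?_⟩
  · intro k
    rw [PySem.Dict.mem_keys_insert]
    by_cases hk : k = a
    · subst hk
      rw [PySem.Dict.getD_insert_self]
      simp only [true_or, true_iff]
      intro hcon
      have hs : s ∈ PySem.Set.add (att.getD k PySem.Set.empty) s :=
        (PySem.Set.mem_add _ _ _).mpr (Or.inr rfl)
      rw [hcon] at hs
      simp at hs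
    · rw [PySem.Dict.getD_insert_of_ne _ _ _ hk]
      simp only [hk, false_or]
      exact h2 k
  · intro k
    by_cases hk : k = a
    · subst hk
      rw [PySem.Dict.getD_insert_self]
      exact PySem.Set.nodup_add _ _ (h3 k)
    · rw [PySem.Dict.getD_insert_of_ne _ _ _ hk]
      exact h3 k

lemma good_recordPair {att : PySem.Dict Char (PySem.Set Char)} (h : GoodDict att)
    (a b : Char) : GoodDict (recordPair att a b) := good_addPair h _ _

lemma good_empty : GoodDict PySem.Dict.empty := by
  refine ⟨?_, ?_, ?_⟩
  · exact PySem.Dict.nodup_keys_empty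
  · intro k
    simp [PySem.Dict.keys_empty, PySem.Dict.getD_empty]
  · intro k
    simp [PySem.Dict.getD_empty, PySem.Set.empty]

-- ---------- A-side invariant ----------

structure CoreS (g : List (List Char)) (mi ni : Int) (nation : Char)
    (grid : List (List Char)) (att : PySem.Dict Char (PySem.Set Char))
    (queue : List (Int × Int)) (vis : PySem.Dict (Int × Int) Bool) : Prop where
  dim : DimOk g grid
  cells : ∀ p : Int × Int, InW mi ni p →
    gget grid p.1 p.2 = gget g p.1 p.2 ∨ gget grid p.1 p.2 = '.'
  good : GoodDict att
  sound : ∀ k v, DMem att k v → RelP g mi ni k v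
  qmem : ∀ p ∈ queue, InW mi ni p ∧ gget g p.1 p.2 = nation ∧ vis.getD p false = true
  qnodup : queue.Nodup
  nation_ne : nation ≠ '.'

def DoneAt (g : List (List Char)) (mi ni : Int) (att : PySem.Dict Char (PySem.Set Char))
    (p : Int × Int) : Prop :=
  ∀ q : Int × Int, InW mi ni q → Adj p q → gget g q.1 q.2 ≠ '.' →
    gget g q.1 q.2 ≠ gget g p.1 p.2 →
    DMem att (sort2 (gget g p.1 p.2) (gget g q.1 q.2)).1
      (sort2 (gget g p.1 p.2) (gget g q.1 q.2)).2

def DoneExc (g : List (List Char)) (mi ni : Int) (grid : List (List Char))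
    (att : PySem.Dict Char (PySem.Set Char)) (queue : List (Int × Int))
    (exc : Option (Int × Int)) : Prop :=
  ∀ p : Int × Int, InW mi ni p → gget g p.1 p.2 ≠ '.' → gget grid p.1 p.2 = '.' →
    p ∉ queue → some p ≠ exc → DoneAt g mi ni att p

lemma stepDir_spec {g : List (List Char)} {mi ni : Int} {nation : Char}
    {grid : List (List Char)} {att : PySem.Dict Char (PySem.Set Char)}
    {queue : List (Int × Int)} {vis : PySem.Dict (Int × Int) Bool}
    {x y : Int} {off : Int × Int}
    (hg : GridOk g mi ni)
    (hc : CoreS g mi ni nation grid att queue vis)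
    (hdone : DoneExc g mi ni grid att queue (some (x, y)))
    (hxw : InW mi ni (x, y))
    (hlab : gget g x y = nation)
    (hoff : off ∈ OFFSET) :
    ∃ grid' att' queue' vis',
      stepDir nation mi ni x y (grid, att, queue, vis) off = (grid', att', queue', vis') ∧
      CoreS g mi ni nation grid' att' queue' vis' ∧
      DoneExc g mi ni grid' att' queue' (some (x, y)) ∧
      (∀ k v, DMem att k v → DMem att' k v) ∧
      (∀ p : Int × Int, vis.getD p false = true → vis'.getD p false = true) ∧
      (∀ p : Int × Int, InW mi ni p → gget grid p.1 p.2 = '.' → gget grid' p.1 p.2 = '.') ∧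
      queue'.length + unv mi ni vis' = queue.length + unv mi ni vis ∧
      (∀ p ∈ queue', p ∈ queue ∨ p = ((x + off.1, y + off.2) : Int × Int)) ∧
      (InW mi ni (x + off.1, y + off.2) → gget g (x + off.1) (y + off.2) ≠ '.' →
        gget g (x + off.1) (y + off.2) ≠ nation →
        DMem att' (sort2 nation (gget g (x + off.1) (y + off.2))).1
          (sort2 nation (gget g (x + off.1) (y + off.2))).2) := by
  obtain ⟨hx0, hx1, hy0, hy1⟩ := hxw
  have hq_ne_xy : ∀ hq : InW mi ni (x + off.1, y + off.2),
      gget g (x + off.1) (y + off.2) ≠ nation → (x + off.1, y + off.2) ≠ ((x, y) : Int × Int) := by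
    intro _ hne hcon
    apply hne
    rw [show x + off.1 = x from congrArg Prod.fst hcon,
      show y + off.2 = y from congrArg Prod.snd hcon]
    exact hlab
  unfold stepDir
  simp only []
  by_cases hov : (isOverflow (x + off.1) (y + off.2) mi ni ||
      (gget grid (x + off.1) (y + off.2) == '.')) = true
  · rw [if_pos hov]
    refine ⟨grid, att, queue, vis, rfl, hc, hdone, fun _ _ h => h, fun _ h => h,
      fun _ _ h => h, rfl, fun p hp => Or.inl hp, ?_⟩
    intro hq hgq hgqn
    rcases Bool.or_eq_true_iff.mp hov with hov1 | hov2
    · have hf := isOverflow_iff.mpr hq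
      rw [hov1] at hf
      simp at hf
    · have hdot : gget grid (x + off.1) (y + off.2) = '.' := by
        simpa using hov2
      have hqq := hq_ne_xy hq hgqn
      have hnq : (x + off.1, y + off.2) ∉ queue := by
        intro hin
        exact hgqn (hc.qmem _ hin).2.1
      have hda := hdone (x + off.1, y + off.2) hq hgq hdot hnq (by simpa using hqq)
      have hadj : Adj ((x, y) : Int × Int) (x + off.1, y + off.2) := ⟨off, hoff, rfl⟩
      have := hda (x, y) ⟨hx0, hx1, hy0, hy1⟩ (adj_symm hadj) (by rw [hlab]; exact hc.nation_ne)
        (by rw [hlab]; exact fun hcc => hgqn hcc.symm)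
      rw [hlab] at this
      rwa [sort2_comm nation (gget g (x + off.1) (y + off.2)) (fun hcc => hgqn hcc.symm)]
  · rw [if_neg hov]
    rw [Bool.not_eq_true] at hov
    obtain ⟨hov1, hov2⟩ := Bool.or_eq_false_iff.mp hov
    have hqin : InW mi ni (x + off.1, y + off.2) := isOverflow_iff.mp hov1
    have hgnd : gget grid (x + off.1) (y + off.2) ≠ '.' := beq_eq_false_iff_ne.mp hov2
    have hgeq : gget grid (x + off.1) (y + off.2) = gget g (x + off.1) (y + off.2) := by
      rcases hc.cells _ hqin with h | h
      · exact h
      · exact absurd h hgnd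
    by_cases hnat : nation ≠ gget grid (x + off.1) (y + off.2)
    · rw [if_pos hnat]
      have hmono : ∀ k v, DMem att k v →
          DMem (recordPair att nation (gget grid (x + off.1) (y + off.2))) k v :=
        fun k v h => dmem_recordPair.mpr (Or.inl h)
      refine ⟨grid, _, queue, vis, rfl, ?_, ?_, hmono, fun _ h => h, fun _ _ h => h, rfl,
        fun p hp => Or.inl hp, ?_⟩
      · refine ⟨hc.dim, hc.cells, good_recordPair hc.good _ _, ?_, hc.qmem, hc.qnodup,
          hc.nation_ne⟩
        intro k v hkv
        rcases dmem_recordPair.mp hkv with h | h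
        · exact hc.sound k v h
        · rw [hgeq] at h
          have hdist : nation ≠ gget g (x + off.1) (y + off.2) := hgeq ▸ hnat
          have hadj : Adj ((x, y) : Int × Int) (x + off.1, y + off.2) := ⟨off, hoff, rfl⟩
          have hgq_ne : gget g (x + off.1) (y + off.2) ≠ '.' := hgeq ▸ hgnd
          rcases sort2_cases nation (gget g (x + off.1) (y + off.2)) hdist with ⟨hs, hlt⟩ |
            ⟨hs, hlt⟩ <;> rw [hs] at h
          · injection h with hk hv
            subst hk
            subst hv
            exact ⟨hlt, hc.nation_ne, hgq_ne,
              (x, y), (x + off.1, y + off.2), ⟨hx0, hx1, hy0, hy1⟩, hqin, hadj, hlab, rfl⟩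
          · injection h with hk hv
            subst hk
            subst hv
            exact ⟨hlt, hgq_ne, hc.nation_ne,
              (x + off.1, y + off.2), (x, y), hqin, ⟨hx0, hx1, hy0, hy1⟩, adj_symm hadj,
              rfl, hlab⟩
      · intro p hp1 hp2 hp3 hp4 hp5 qq h1 h2 h3 h4
        exact hmono _ _ (hdone p hp1 hp2 hp3 hp4 hp5 qq h1 h2 h3 h4)
      · intro _ _ hgqn
        apply dmem_recordPair.mpr
        exact Or.inr (by rw [hgeq])
    · rw [if_neg hnat]
      have hnat' : nation = gget grid (x + off.1) (y + off.2) := not_not.mp hnat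
      have hlabq : gget g (x + off.1) (y + off.2) = nation := by rw [← hgeq, ← hnat']
      by_cases hvq : vis.getD (x + off.1, y + off.2) false = true
      · rw [if_pos hvq]
        exact ⟨grid, att, queue, vis, rfl, hc, hdone, fun _ _ h => h, fun _ h => h,
          fun _ _ h => h, rfl, fun p hp => Or.inl hp,
          fun _ _ hgqn => absurd hlabq hgqn⟩
      · rw [if_neg hvq]
        rw [Bool.not_eq_true] at hvq
        have hvqf : vis.getD (x + off.1, y + off.2) false = false := hvq
        have hq_notin : ((x + off.1, y + off.2) : Int × Int) ∉ queue := by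
          intro hin
          have htru := (hc.qmem _ hin).2.2
          rw [htru] at hvqf
          simp at hvqf
        have hbounds := inW_bounds hg hc.dim ⟨hx0, hx1, hy0, hy1⟩
        refine ⟨_, att, queue ++ [(x + off.1, y + off.2)], _, rfl, ?_, ?_,
          fun _ _ h => h, ?_, ?_, ?_, fun p hp => List.mem_append.mp hp |>.imp id
            (by intro h; simpa using h), fun _ _ hgqn => absurd hlabq hgqn⟩
        · refine ⟨dim_gset hc.dim _ _ _, ?_, hc.good, hc.sound, ?_, ?_, hc.nation_ne⟩
          · intro p hp
            by_cases hpxy : p = ((x, y) : Int × Int)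
            · subst hpxy
              right
              exact gget_gset_self hbounds.1 hbounds.2
            · rw [gget_gset_ne hx0 hy0 hp.1 hp.2.2.1 (by
                intro hcon
                exact hpxy (Prod.ext (congrArg Prod.fst hcon) (congrArg Prod.snd hcon)))]
              exact hc.cells p hp
          · intro p hp
            rcases List.mem_append.mp hp with hin | hin
            · obtain ⟨ha, hb, hcv⟩ := hc.qmem p hin
              refine ⟨ha, hb, ?_⟩
              rw [PySem.Dict.getD_insert_of_ne _ _ _ (by
                intro hcon
                rw [hcon, hvqf] at hcv
                exact Bool.false_ne_true hcv)]
              exact hcv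
            · have : p = ((x + off.1, y + off.2) : Int × Int) := by simpa using hin
              subst this
              exact ⟨hqin, hlabq, PySem.Dict.getD_insert_self _ _ _ _⟩
          · rw [List.nodup_append]
            refine ⟨hc.qnodup, List.nodup_singleton _, ?_⟩
            intro a ha b hb
            rw [show b = ((x + off.1, y + off.2) : Int × Int) by simpa using hb]
            intro hcon
            rw [hcon] at ha
            exact hq_notin ha
        · intro p hp1 hp2 hp3 hp4 hp5
          have hpxy : p ≠ ((x, y) : Int × Int) := by
            intro hcon
            exact (by simpa using hp5 : p ≠ (x, y)) hcon
          rw [gget_gset_ne hx0 hy0 hp1.1 hp1.2.2.1 (by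
            intro hcon
            exact hpxy (Prod.ext (congrArg Prod.fst hcon) (congrArg Prod.snd hcon)))] at hp3
          exact hdone p hp1 hp2 hp3 (fun hin => hp4 (List.mem_append_left _ hin)) hp5
        · intro p hvp
          by_cases hpq : p = ((x + off.1, y + off.2) : Int × Int)
          · subst hpq
            rw [PySem.Dict.getD_insert_self]
          · rw [PySem.Dict.getD_insert_of_ne _ _ _ hpq]
            exact hvp
        · intro p hp hpd
          by_cases hpxy : p = ((x, y) : Int × Int)
          · subst hpxy
            exact gget_gset_self hbounds.1 hbounds.2
          · rw [gget_gset_ne hx0 hy0 hp.1 hp.2.2.1 (by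
              intro hcon
              exact hpxy (Prod.ext (congrArg Prod.fst hcon) (congrArg Prod.snd hcon)))]
            exact hpd
        · rw [List.length_append, List.length_singleton]
          have := unv_insert hqin hvqf
          omega

lemma bfs_spec {g : List (List Char)} {mi ni : Int} {nation : Char}
    (hg : GridOk g mi ni) :
    ∀ (fuel : Nat) (grid : List (List Char)) (att : PySem.Dict Char (PySem.Set Char))
      (queue : List (Int × Int)) (vis : PySem.Dict (Int × Int) Bool),
      CoreS g mi ni nation grid att queue vis →
      DoneExc g mi ni grid att queue none →
      queue.length + unv mi ni vis ≤ fuel →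
      ∃ grid' att' vis',
        bfsLoop nation mi ni fuel (grid, att, queue, vis) = (grid', att', [], vis') ∧
        CoreS g mi ni nation grid' att' [] vis' ∧
        DoneExc g mi ni grid' att' [] none ∧
        (∀ k v, DMem att k v → DMem att' k v) ∧
        (∀ p : Int × Int, InW mi ni p → gget grid p.1 p.2 = '.' →
          gget grid' p.1 p.2 = '.') := by
  intro fuel
  induction fuel with
  | zero =>
    intro grid att queue vis hc hdone hm
    cases queue with
    | nil =>
      exact ⟨grid, att, vis, rfl, hc, hdone, fun _ _ h => h, fun _ _ h => h⟩
    | cons hd rest =>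
      simp at hm
  | succ f ih =>
    intro grid att queue vis hc hdone hm
    cases queue with
    | nil =>
      exact ⟨grid, att, vis, rfl, hc, hdone, fun _ _ h => h, fun _ _ h => h⟩
    | cons hd rest =>
      obtain ⟨x, y⟩ := hd
      have hq := hc.qmem (x, y) List.mem_cons_self
      have hxw : InW mi ni (x, y) := hq.1
      have hlab : gget g x y = nation := hq.2.1
      have hc1 : CoreS g mi ni nation grid att rest vis :=
        ⟨hc.dim, hc.cells, hc.good, hc.sound,
          fun p hp => hc.qmem p (List.mem_cons_of_mem _ hp),
          (List.nodup_cons.mp hc.qnodup).2, hc.nation_ne⟩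
      have hdone1 : DoneExc g mi ni grid att rest (some (x, y)) := by
        intro p h1 h2 h3 h4 h5
        refine hdone p h1 h2 h3 ?_ (by simp)
        intro hin
        rcases List.mem_cons.mp hin with hcon | hcon
        · exact h5 (by rw [hcon])
        · exact h4 hcon
      obtain ⟨g1, a1, q1, v1, he1, hcs1, hds1, hma1, hmv1, hmg1, hme1, hqm1, hp1⟩ :=
        stepDir_spec (off := ((-1 : Int), (0 : Int))) hg hc1 hdone1 hxw hlab (by simp [OFFSET])
      obtain ⟨g2, a2, q2, v2, he2, hcs2, hds2, hma2, hmv2, hmg2, hme2, hqm2, hp2⟩ :=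
        stepDir_spec (off := ((0 : Int), (1 : Int))) hg hcs1 hds1 hxw hlab (by simp [OFFSET])
      obtain ⟨g3, a3, q3, v3, he3, hcs3, hds3, hma3, hmv3, hmg3, hme3, hqm3, hp3⟩ :=
        stepDir_spec (off := ((1 : Int), (0 : Int))) hg hcs2 hds2 hxw hlab (by simp [OFFSET])
      obtain ⟨g4, a4, q4, v4, he4, hcs4, hds4, hma4, hmv4, hmg4, hme4, hqm4, hp4⟩ :=
        stepDir_spec (off := ((0 : Int), (-1 : Int))) hg hcs3 hds3 hxw hlab (by simp [OFFSET])
      have hfold : OFFSET.foldl (stepDir nation mi ni x y) (grid, att, rest, vis) =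
          (g4, a4, q4, v4) := by
        simp only [OFFSET, List.foldl_cons, List.foldl_nil]
        rw [he1, he2, he3, he4]
      have hred : bfsLoop nation mi ni (f + 1) (grid, att, (x, y) :: rest, vis) =
          bfsLoop nation mi ni f (OFFSET.foldl (stepDir nation mi ni x y)
            (grid, att, rest, vis)) := rfl
      have hdone4 : DoneExc g mi ni g4 a4 q4 none := by
        intro p h1 h2 h3 h4 _
        by_cases hpxy : p = ((x, y) : Int × Int)
        · subst hpxy
          intro qq hq1 hadj hqd hqne
          obtain ⟨off, hoffm, rfl⟩ := hadj
          have hgoal : gget g (x, y).1 (x, y).2 = nation := hlab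
          rw [hgoal] at hqne ⊢
          simp only [OFFSET, List.mem_cons, List.not_mem_nil, or_false] at hoffm
          rcases hoffm with rfl | rfl | rfl | rfl
          · exact hma4 _ _ (hma3 _ _ (hma2 _ _ (hp1 hq1 hqd hqne)))
          · exact hma4 _ _ (hma3 _ _ (hp2 hq1 hqd hqne))
          · exact hma4 _ _ (hp3 hq1 hqd hqne)
          · exact hp4 hq1 hqd hqne
        · exact hds4 p h1 h2 h3 h4 (by simpa using hpxy)
      have hms : q4.length + unv mi ni v4 ≤ f := by
        have hlen : ((x, y) :: rest).length = rest.length + 1 := rfl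
        rw [hlen] at hm
        omega
      obtain ⟨grid', att', vis', heq, hcf, hdf, hmaf, hmgf⟩ := ih g4 a4 q4 v4 hcs4 hdone4 hms
      refine ⟨grid', att', vis', ?_, hcf, hdf, ?_, ?_⟩
      · rw [hred, hfold, heq]
      · exact fun k v h => hmaf k v (hma4 _ _ (hma3 _ _ (hma2 _ _ (hma1 _ _ h))))
      · exact fun p hp h => hmgf p hp (hmg4 _ hp (hmg3 _ hp (hmg2 _ hp (hmg1 _ hp h))))


-- ---------- the outer loop ----------

def OCore (g : List (List Char)) (mi ni : Int) (grid : List (List Char))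
    (att : PySem.Dict Char (PySem.Set Char)) : Prop :=
  DimOk g grid ∧
  (∀ p : Int × Int, InW mi ni p →
    gget grid p.1 p.2 = gget g p.1 p.2 ∨ gget grid p.1 p.2 = '.') ∧
  GoodDict att ∧
  (∀ k v, DMem att k v → RelP g mi ni k v) ∧
  DoneExc g mi ni grid att [] none

lemma cellStep_spec {g : List (List Char)} {mi ni : Int}
    {grid : List (List Char)} {att : PySem.Dict Char (PySem.Set Char)} {i j : Int}
    (hg : GridOk g mi ni) (ho : OCore g mi ni grid att) (hij : InW mi ni (i, j)) :
    OCore g mi ni (cellStep mi ni (grid, att) i j).1 (cellStep mi ni (grid, att) i j).2 ∧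
    (∀ p : Int × Int, InW mi ni p → gget grid p.1 p.2 = '.' →
      gget (cellStep mi ni (grid, att) i j).1 p.1 p.2 = '.') ∧
    (gget (cellStep mi ni (grid, att) i j).1 i j = '.' ∨ gget g i j = '.') := by
  obtain ⟨hdim, hcells, hgood, hsound, hdone⟩ := ho
  unfold cellStep
  by_cases hdot : (gget (grid, att).1 i j == '.') = true
  · rw [if_pos hdot]
    exact ⟨⟨hdim, hcells, hgood, hsound, hdone⟩, fun _ _ h => h,
      Or.inl (by simpa using hdot)⟩
  · rw [if_neg hdot]
    simp only []
    have hnd : gget grid i j ≠ '.' := by simpa using hdot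
    have hlab : gget grid i j = gget g i j := by
      rcases hcells (i, j) hij with h | h
      · exact h
      · exact absurd h hnd
    have hbounds := inW_bounds hg hdim hij
    have hcs : CoreS g mi ni (gget (grid, att).1 i j) (gset (grid, att).1 i j '.') att
        [(i, j)] (PySem.Dict.empty.insert (i, j) true) := by
      refine ⟨dim_gset hdim _ _ _, ?_, hgood, hsound, ?_, List.nodup_singleton _, ?_⟩
      · intro p hp
        by_cases hpij : p = ((i, j) : Int × Int)
        · subst hpij
          exact Or.inr (gget_gset_self hbounds.1 hbounds.2)
        · rw [gget_gset_ne hij.1 hij.2.2.1 hp.1 hp.2.2.1 (by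
            intro hcon
            exact hpij (Prod.ext (congrArg Prod.fst hcon) (congrArg Prod.snd hcon)))]
          exact hcells p hp
      · intro p hp
        rw [show p = ((i, j) : Int × Int) by simpa using hp]
        exact ⟨hij, hlab.symm, PySem.Dict.getD_insert_self _ _ _ _⟩
      · exact hlab ▸ hnd
    have hde : DoneExc g mi ni (gset (grid, att).1 i j '.') att [(i, j)] none := by
      intro p h1 h2 h3 h4 _
      have hpij : p ≠ ((i, j) : Int × Int) := by
        intro hcon
        exact h4 (by rw [hcon]; exact List.mem_singleton_self _)
      rw [gget_gset_ne hij.1 hij.2.2.1 h1.1 h1.2.2.1 (by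
        intro hcon
        exact hpij (Prod.ext (congrArg Prod.fst hcon) (congrArg Prod.snd hcon)))] at h3
      exact hdone p h1 h2 h3 (List.not_mem_nil) (by simp)
    have hmeas : [((i, j) : Int × Int)].length +
        unv mi ni (PySem.Dict.empty.insert (i, j) true) ≤ mi.toNat * ni.toNat + 1 := by
      have := unv_bound (vis := PySem.Dict.empty.insert (i, j) true) hij
        (PySem.Dict.getD_insert_self PySem.Dict.empty (i, j) true false)
      simp only [List.length_singleton]
      omega
    obtain ⟨grid', att', vis', heq, hcf, hdf, hmaf, hmgf⟩ :=
      bfs_spec hg (mi.toNat * ni.toNat + 1) _ _ _ _ hcs hde hmeas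
    rw [heq]
    refine ⟨⟨hcf.dim, hcf.cells, hcf.good, hcf.sound, hdf⟩, ?_, ?_⟩
    · intro p hp h
      apply hmgf p hp
      by_cases hpij : p = ((i, j) : Int × Int)
      · subst hpij
        exact gget_gset_self hbounds.1 hbounds.2
      · rw [gget_gset_ne hij.1 hij.2.2.1 hp.1 hp.2.2.1 (by
          intro hcon
          exact hpij (Prod.ext (congrArg Prod.fst hcon) (congrArg Prod.snd hcon)))]
        exact h
    · left
      exact hmgf (i, j) hij (gget_gset_self hbounds.1 hbounds.2)

lemma foldCells_spec {g : List (List Char)} {mi ni : Int} (hg : GridOk g mi ni) :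
    ∀ (l : List (Int × Int)) (grid : List (List Char))
      (att : PySem.Dict Char (PySem.Set Char)),
      OCore g mi ni grid att → (∀ p ∈ l, InW mi ni p) →
      OCore g mi ni (l.foldl (fun st p => cellStep mi ni st p.1 p.2) (grid, att)).1
        (l.foldl (fun st p => cellStep mi ni st p.1 p.2) (grid, att)).2 ∧
      (∀ p : Int × Int, InW mi ni p → gget grid p.1 p.2 = '.' →
        gget (l.foldl (fun st p => cellStep mi ni st p.1 p.2) (grid, att)).1 p.1 p.2 = '.') ∧
      (∀ p ∈ l, gget (l.foldl (fun st p => cellStep mi ni st p.1 p.2) (grid, att)).1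
          p.1 p.2 = '.' ∨ gget g p.1 p.2 = '.') := by
  intro l
  induction l with
  | nil =>
    intro grid att ho _
    exact ⟨ho, fun _ _ h => h, fun p hp => absurd hp (List.not_mem_nil)⟩
  | cons hd t ih =>
    intro grid att ho hmem
    have hhd : InW mi ni hd := hmem hd List.mem_cons_self
    obtain ⟨ho1, hmg1, hthird⟩ := cellStep_spec hg ho hhd
    have hstep : cellStep mi ni (grid, att) hd.1 hd.2 =
        ((cellStep mi ni (grid, att) hd.1 hd.2).1, (cellStep mi ni (grid, att) hd.1 hd.2).2) :=
      rfl
    have hfold : (hd :: t).foldl (fun st p => cellStep mi ni st p.1 p.2) (grid, att) =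
        t.foldl (fun st p => cellStep mi ni st p.1 p.2)
          ((cellStep mi ni (grid, att) hd.1 hd.2).1,
           (cellStep mi ni (grid, att) hd.1 hd.2).2) := by
      rw [List.foldl_cons, ← hstep]
    obtain ⟨hof, hmgf, hthf⟩ := ih _ _ ho1 (fun p hp => hmem p (List.mem_cons_of_mem _ hp))
    rw [hfold]
    refine ⟨hof, ?_, ?_⟩
    · intro p hp h
      exact hmgf p hp (hmg1 p hp h)
    · intro p hp
      rcases List.mem_cons.mp hp with rfl | hin
      · rcases hthird with h | h
        · exact Or.inl (hmgf p hhd h)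
        · exact Or.inr h
      · exact hthf p hin

-- A's final dict realizes RelP
lemma afold_complete {g : List (List Char)} {mi ni : Int} (hg : GridOk g mi ni) :
    ∀ k v, DMem ((winList mi ni).foldl
        (fun st p => cellStep mi ni st p.1 p.2)
        (g, PySem.Dict.empty)).2 k v ↔ RelP g mi ni k v := by
  have ho : OCore g mi ni g PySem.Dict.empty := by
    refine ⟨⟨rfl, fun _ => rfl⟩, fun p _ => Or.inl rfl, good_empty, ?_, ?_⟩
    · intro k v h
      unfold DMem at h
      rw [PySem.Dict.getD_empty] at h
      simp [PySem.Set.empty] at h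
    · intro p _ h2 h3 _ _
      exact absurd h3 h2
  obtain ⟨⟨_, _, _, hsound, hdone⟩, _, hthird⟩ :=
    foldCells_spec hg (winList mi ni) g PySem.Dict.empty ho (fun p hp => mem_winList.mp hp)
  intro k v
  constructor
  · exact hsound k v
  · rintro ⟨hlt, hkd, hvd, p, q, hpw, hqw, hadj, hpk, hqv⟩
    have hpd : gget g p.1 p.2 ≠ '.' := hpk ▸ hkd
    rcases hthird p (mem_winList.mpr hpw) with hemp | hcon
    swap
    · exact absurd hcon hpd
    have hda := hdone p hpw hpd hemp (List.not_mem_nil) (by simp)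
    have := hda q hqw hadj (hqv ▸ hvd) (by rw [hpk, hqv]; exact hlt.ne')
    rw [hpk, hqv, sort2_of_lt hlt] at this
    exact this

-- ---------- B-side characterization ----------

def BPairAt (g : List (List Char)) (mi ni : Int) (p : Int × Int) (k v : Char) : Prop :=
  ∃ q, (q = ((p.1, p.2 + 1) : Int × Int) ∨ q = ((p.1 + 1, p.2) : Int × Int)) ∧
    q.1 < mi ∧ q.2 < ni ∧
    gget g p.1 p.2 ≠ '.' ∧ gget g q.1 q.2 ≠ '.' ∧ gget g q.1 q.2 ≠ gget g p.1 p.2 ∧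
    (k, v) = sort2 (gget g p.1 p.2) (gget g q.1 q.2)

def bstep (g : List (List Char)) (mi ni : Int)
    (d : PySem.Dict Char (PySem.Set Char)) (p : Int × Int) :
    PySem.Dict Char (PySem.Set Char) :=
  if gget g p.1 p.2 == '.' then d
  else [(p.1, p.2 + 1), (p.1 + 1, p.2)].foldl (fun d3 (xy : Int × Int) =>
    if decide (xy.1 < mi) && decide (xy.2 < ni) then
      if gget g xy.1 xy.2 ≠ '.' ∧ gget g xy.1 xy.2 ≠ gget g p.1 p.2 then
        d3.insert (sort2 (gget g p.1 p.2) (gget g xy.1 xy.2)).1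
          (PySem.Set.add (d3.getD (sort2 (gget g p.1 p.2) (gget g xy.1 xy.2)).1
            PySem.Set.empty) (sort2 (gget g p.1 p.2) (gget g xy.1 xy.2)).2)
      else d3
    else d3) d

lemma bfold_spec {g : List (List Char)} {mi ni : Int} :
    ∀ (l : List (Int × Int)) (d : PySem.Dict Char (PySem.Set Char)),
      GoodDict d →
      GoodDict (l.foldl (bstep g mi ni) d) ∧
      ∀ k v, (DMem (l.foldl (bstep g mi ni) d) k v ↔
        (DMem d k v ∨ ∃ p ∈ l, BPairAt g mi ni p k v)) := by
  have hstep : ∀ (d : PySem.Dict Char (PySem.Set Char)) (p : Int × Int), GoodDict d →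
      GoodDict (bstep g mi ni d p) ∧
      ∀ k v, (DMem (bstep g mi ni d p) k v ↔ (DMem d k v ∨ BPairAt g mi ni p k v)) := by
    intro d p hgood
    unfold bstep
    by_cases hdot : (gget g p.1 p.2 == '.') = true
    · rw [if_pos hdot]
      refine ⟨hgood, fun k v => ?_⟩
      have hnb : ¬ BPairAt g mi ni p k v := by
        rintro ⟨q, _, _, _, hgp, _⟩
        exact hgp (by simpa using hdot)
      simp [hnb]
    · rw [if_neg hdot]
      have hgpd : gget g p.1 p.2 ≠ '.' := by simpa using hdot
      have hinner : ∀ (d3 : PySem.Dict Char (PySem.Set Char)) (xy : Int × Int), GoodDict d3 →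
          GoodDict ((fun d3 (xy : Int × Int) =>
            if decide (xy.1 < mi) && decide (xy.2 < ni) then
              if gget g xy.1 xy.2 ≠ '.' ∧ gget g xy.1 xy.2 ≠ gget g p.1 p.2 then
                d3.insert (sort2 (gget g p.1 p.2) (gget g xy.1 xy.2)).1
                  (PySem.Set.add (d3.getD (sort2 (gget g p.1 p.2) (gget g xy.1 xy.2)).1
                    PySem.Set.empty) (sort2 (gget g p.1 p.2) (gget g xy.1 xy.2)).2)
              else d3
            else d3) d3 xy) ∧
          ∀ k v, (DMem ((fun d3 (xy : Int × Int) =>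
            if decide (xy.1 < mi) && decide (xy.2 < ni) then
              if gget g xy.1 xy.2 ≠ '.' ∧ gget g xy.1 xy.2 ≠ gget g p.1 p.2 then
                d3.insert (sort2 (gget g p.1 p.2) (gget g xy.1 xy.2)).1
                  (PySem.Set.add (d3.getD (sort2 (gget g p.1 p.2) (gget g xy.1 xy.2)).1
                    PySem.Set.empty) (sort2 (gget g p.1 p.2) (gget g xy.1 xy.2)).2)
              else d3
            else d3) d3 xy) k v ↔ (DMem d3 k v ∨
              (xy.1 < mi ∧ xy.2 < ni ∧ gget g xy.1 xy.2 ≠ '.' ∧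
                gget g xy.1 xy.2 ≠ gget g p.1 p.2 ∧
                (k, v) = sort2 (gget g p.1 p.2) (gget g xy.1 xy.2)))) := by
        intro d3 xy hg3
        simp only []
        by_cases hb : (decide (xy.1 < mi) && decide (xy.2 < ni)) = true
        · rw [if_pos hb]
          obtain ⟨hb1, hb2⟩ := Bool.and_eq_true_iff.mp hb
          rw [decide_eq_true_iff] at hb1 hb2
          by_cases hcnd : gget g xy.1 xy.2 ≠ '.' ∧ gget g xy.1 xy.2 ≠ gget g p.1 p.2
          · rw [if_pos hcnd]
            refine ⟨good_addPair hg3 _ _, fun k v => ?_⟩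
            rw [dmem_addPair, Prod.mk.eta]
            constructor
            · rintro (h | h)
              · exact Or.inl h
              · exact Or.inr ⟨hb1, hb2, hcnd.1, hcnd.2, h⟩
            · rintro (h | ⟨_, _, _, _, h⟩)
              · exact Or.inl h
              · exact Or.inr h
          · rw [if_neg hcnd]
            refine ⟨hg3, fun k v => ?_⟩
            constructor
            · exact Or.inl
            · rintro (h | ⟨_, _, hh1, hh2, _⟩)
              · exact h
              · exact absurd ⟨hh1, hh2⟩ hcnd
        · rw [if_neg hb]
          rw [Bool.and_eq_true_iff] at hb
          refine ⟨hg3, fun k v => ?_⟩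
          constructor
          · exact Or.inl
          · rintro (h | ⟨hh1, hh2, _⟩)
            · exact h
            · exact absurd (⟨decide_eq_true_iff.mpr hh1, decide_eq_true_iff.mpr hh2⟩ :
                decide (xy.1 < mi) = true ∧ decide (xy.2 < ni) = true) hb
      simp only [List.foldl_cons, List.foldl_nil]
      obtain ⟨hgd1, hiff1⟩ := hinner d (p.1, p.2 + 1) hgood
      obtain ⟨hgd2, hiff2⟩ := hinner _ (p.1 + 1, p.2) hgd1
      refine ⟨hgd2, fun k v => ?_⟩
      rw [hiff2, hiff1]
      constructor
      · rintro ((h | ⟨h1, h2, h3, h4, h5⟩) | ⟨h1, h2, h3, h4, h5⟩)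
        · exact Or.inl h
        · exact Or.inr ⟨(p.1, p.2 + 1), Or.inl rfl, h1, h2, hgpd, h3, h4, h5⟩
        · exact Or.inr ⟨(p.1 + 1, p.2), Or.inr rfl, h1, h2, hgpd, h3, h4, h5⟩
      · rintro (h | ⟨q, hqor, h1, h2, _, h3, h4, h5⟩)
        · exact Or.inl (Or.inl h)
        · rcases hqor with rfl | rfl
          · exact Or.inl (Or.inr ⟨h1, h2, h3, h4, h5⟩)
          · exact Or.inr ⟨h1, h2, h3, h4, h5⟩
  intro l
  induction l with
  | nil =>
    intro d hgood
    refine ⟨hgood, fun k v => ?_⟩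
    simp
  | cons hd t ih =>
    intro d hgood
    obtain ⟨hg1, hiff1⟩ := hstep d hd hgood
    obtain ⟨hgf, hifff⟩ := ih (bstep g mi ni d hd) hg1
    rw [List.foldl_cons]
    refine ⟨hgf, fun k v => ?_⟩
    rw [hifff, hiff1]
    constructor
    · rintro ((h | h) | ⟨p, hp, h⟩)
      · exact Or.inl h
      · exact Or.inr ⟨hd, List.mem_cons_self, h⟩
      · exact Or.inr ⟨p, List.mem_cons_of_mem _ hp, h⟩
    · rintro (h | ⟨p, hp, h⟩)
      · exact Or.inl (Or.inl h)
      · rcases List.mem_cons.mp hp with rfl | hin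
        · exact Or.inl (Or.inr h)
        · exact Or.inr ⟨p, hin, h⟩

lemma bpair_iff_rel {g : List (List Char)} {mi ni : Int} {k v : Char} :
    (∃ p ∈ winList mi ni, BPairAt g mi ni p k v) ↔ RelP g mi ni k v := by
  constructor
  · rintro ⟨p, hpl, q, hqor, h1, h2, hgp, hgq, hne, hkv⟩
    have hpw : InW mi ni p := mem_winList.mp hpl
    have hqw : InW mi ni q := by
      rcases hqor with rfl | rfl
      · exact ⟨hpw.1, h1, by have := hpw.2.2.1; omega, h2⟩
      · exact ⟨by have := hpw.1; omega, h1, hpw.2.2.1, h2⟩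
    have hadj : Adj p q := by
      rcases hqor with rfl | rfl
      · exact ⟨(0, 1), by simp [OFFSET], by simp⟩
      · exact ⟨(1, 0), by simp [OFFSET], by simp⟩
    have hdist : gget g p.1 p.2 ≠ gget g q.1 q.2 := fun hcc => hne hcc.symm
    rcases sort2_cases (gget g p.1 p.2) (gget g q.1 q.2) hdist with ⟨hs, hlt⟩ | ⟨hs, hlt⟩ <;>
      rw [hs] at hkv <;> injection hkv with hk hv <;> subst hk <;> subst hv
    · exact ⟨hlt, hgp, hgq, p, q, hpw, hqw, hadj, rfl, rfl⟩
    · exact ⟨hlt, hgq, hgp, q, p, hqw, hpw, adj_symm hadj, rfl, rfl⟩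
  · rintro ⟨hlt, hkd, hvd, p, q, hpw, hqw, hadj, hpk, hqv⟩
    have hbuild : ∀ w q' : Int × Int, (q' = ((w.1, w.2 + 1) : Int × Int) ∨
        q' = ((w.1 + 1, w.2) : Int × Int)) → q'.1 < mi → q'.2 < ni →
        ((gget g w.1 w.2 = k ∧ gget g q'.1 q'.2 = v) ∨
         (gget g w.1 w.2 = v ∧ gget g q'.1 q'.2 = k)) →
        BPairAt g mi ni w k v := by
      rintro w q' hor h1 h2 (⟨ha, hb⟩ | ⟨ha, hb⟩) <;>
        refine ⟨q', hor, h1, h2, ?_, ?_, ?_, ?_⟩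
      · exact ha ▸ hkd
      · exact hb ▸ hvd
      · rw [ha, hb]; exact hlt.ne'
      · rw [ha, hb, sort2_of_lt hlt]
      · exact ha ▸ hvd
      · exact hb ▸ hkd
      · rw [ha, hb]; exact hlt.ne
      · rw [ha, hb, sort2_comm v k hlt.ne', sort2_of_lt hlt]
    obtain ⟨off, hoffm, rfl⟩ := hadj
    simp only [OFFSET, List.mem_cons, List.not_mem_nil, or_false] at hoffm
    have hp1 : gget g p.1 p.2 = k := hpk
    rcases hoffm with rfl | rfl | rfl | rfl
    · exact ⟨(p.1 + -1, p.2 + 0), mem_winList.mpr hqw,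
        hbuild _ p (Or.inr (Prod.ext (by simp) (by simp))) hpw.2.1 hpw.2.2.2
          (Or.inr ⟨hqv, hp1⟩)⟩
    · exact ⟨p, mem_winList.mpr hpw,
        hbuild p _ (Or.inl (Prod.ext (by simp) (by simp))) hqw.2.1 hqw.2.2.2
          (Or.inl ⟨hp1, hqv⟩)⟩
    · exact ⟨p, mem_winList.mpr hpw,
        hbuild p _ (Or.inr (Prod.ext (by simp) (by simp))) hqw.2.1 hqw.2.2.2
          (Or.inl ⟨hp1, hqv⟩)⟩
    · exact ⟨(p.1 + 0, p.2 + -1), mem_winList.mpr hqw,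
        hbuild _ p (Or.inl (Prod.ext (by simp) (by simp))) hpw.2.1 hpw.2.2.2
          (Or.inr ⟨hqv, hp1⟩)⟩

-- ---------- tallies ----------

lemma tally_eq {d1 d2 : PySem.Dict Char (PySem.Set Char)}
    (h1 : GoodDict d1) (h2 : GoodDict d2)
    (hm : ∀ k v, DMem d1 k v ↔ DMem d2 k v) :
    (d1.keys.foldl
      (fun (cm : Int × Int) k =>
        (cm.1 + ((d1.getD k PySem.Set.empty).length : Int),
         max cm.2 ((d1.getD k PySem.Set.empty).length : Int)))
      ((0 : Int), (0 : Int))) =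
    ((d2.values.map (fun s => ((s.length : Int)))).sum,
     (PySem.List.max? (d2.values.map (fun s => ((s.length : Int)))) (fun x => x)).getD 0) := by
  -- both tallies are tallies of the same multiset of per-key set sizes
  have hkeysperm : d1.keys.Perm d2.keys := by
    rw [List.perm_ext_iff_of_nodup h1.1 h2.1]
    intro k
    rw [h1.2.1 k, h2.2.1 k]
    constructor <;> intro hne <;>
      rcases List.exists_mem_of_ne_nil _ hne with ⟨v, hv⟩
    · exact fun hcon => (List.eq_nil_iff_forall_not_mem.mp hcon v) ((hm k v).mp hv)
    · exact fun hcon => (List.eq_nil_iff_forall_not_mem.mp hcon v) ((hm k v).mpr hv)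
  have hlen : ∀ k, ((d1.getD k PySem.Set.empty).length : Int) =
      ((d2.getD k PySem.Set.empty).length : Int) := by
    intro k
    have hperm : (d1.getD k PySem.Set.empty).Perm (d2.getD k PySem.Set.empty) :=
      (List.perm_ext_iff_of_nodup (h1.2.2 k) (h2.2.2 k)).mpr (fun v => hm k v)
    rw [hperm.length_eq]
  have hvals : d2.values.map (fun s => ((s.length : Int))) =
      d2.keys.map (fun k => ((d2.getD k PySem.Set.empty).length : Int)) := by
    have hitems := PySem.Dict.items_eq_map_keys d2 h2.1 PySem.Set.empty
    have : d2.values = d2.items.map (·.2) := rfl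
    rw [this, hitems, List.map_map, List.map_map]
    rfl
  have hL : (d1.keys.map (fun k => ((d1.getD k PySem.Set.empty).length : Int))).Perm
      (d2.values.map (fun s => ((s.length : Int)))) := by
    rw [hvals]
    have := hkeysperm.map (fun k => ((d1.getD k PySem.Set.empty).length : Int))
    refine this.trans ?_
    rw [List.map_congr_left (fun k _ => hlen k)]
  rw [PySem.List.foldl_prod_mk
    (f := fun acc k => acc + ((d1.getD k PySem.Set.empty).length : Int))
    (g := fun acc k => max acc ((d1.getD k PySem.Set.empty).length : Int))]
  rw [Prod.mk.injEq]
  constructor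
  · rw [PySem.List.foldl_add]
    rw [hL.sum_eq]
    ring
  · have hfold : d1.keys.foldl
        (fun acc k => max acc ((d1.getD k PySem.Set.empty).length : Int)) 0 =
        (d1.keys.map (fun k => ((d1.getD k PySem.Set.empty).length : Int))).foldl max 0 := by
      rw [List.foldl_map]
    rw [hfold, hL.foldl_eq 0]
    cases hv : d2.values.map (fun s => ((s.length : Int))) with
    | nil => simp [PySem.List.max?]
    | cons x t =>
      rw [PySem.List.max?_id_cons, Option.getD_some, List.foldl_cons]
      have hx : (0 : Int) ≤ x := by
        have : x ∈ d2.values.map (fun s => ((s.length : Int))) := by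
          rw [hv]; exact List.mem_cons_self
        obtain ⟨s, _, rfl⟩ := List.mem_map.mp this
        positivity
      rw [max_eq_right hx]

-- ---------- assembly ----------

lemma winList_flatMap (M N : Nat) :
    winList (M : Int) (N : Int) =
      (List.range M).flatMap (fun (a : Nat) =>
        (List.range N).map (fun (b : Nat) => ((a : Int), (b : Int)))) := by
  unfold winList
  rw [Int.toNat_natCast, Int.toNat_natCast]
  simp only [List.product, List.map_flatMap, List.map_map]
  rfl

lemma nestedA (M N : Nat)
    (init : List (List Char) × PySem.Dict Char (PySem.Set Char)) :
    (PySem.List.pyRange 0 (M : Int)).foldl (fun st i =>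
      (PySem.List.pyRange 0 (N : Int)).foldl
        (fun st2 j => cellStep (M : Int) (N : Int) st2 i j) st) init =
    (winList (M : Int) (N : Int)).foldl
      (fun st p => cellStep (M : Int) (N : Int) st p.1 p.2) init := by
  rw [winList_flatMap, List.foldl_flatMap]
  simp only [PySem.List.pyRange_zero_natCast, List.foldl_map]

lemma nestedB (g : List (List Char)) (M N : Nat) (init : PySem.Dict Char (PySem.Set Char)) :
    (PySem.List.pyRange 0 (M : Int)).foldl (fun d i =>
      (PySem.List.pyRange 0 (N : Int)).foldl (fun d2 j =>
        if gget g i j == '.' then d2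
        else [(i, j + 1), (i + 1, j)].foldl (fun d3 (xy : Int × Int) =>
          if decide (xy.1 < (M : Int)) && decide (xy.2 < (N : Int)) then
            if gget g xy.1 xy.2 ≠ '.' ∧ gget g xy.1 xy.2 ≠ gget g i j then
              d3.insert (sort2 (gget g i j) (gget g xy.1 xy.2)).1
                (PySem.Set.add (d3.getD (sort2 (gget g i j) (gget g xy.1 xy.2)).1
                  PySem.Set.empty) (sort2 (gget g i j) (gget g xy.1 xy.2)).2)
            else d3
          else d3) d2) d) init =
    (winList (M : Int) (N : Int)).foldl (bstep g (M : Int) (N : Int)) init := by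
  rw [winList_flatMap, List.foldl_flatMap]
  simp only [PySem.List.pyRange_zero_natCast, List.foldl_map, bstep]

lemma solution_eq_fold (maps : List String) :
    solution maps =
      (let mi : Int := maps.length
       let ni : Int := ((maps.getD 0 "").toList.length : Int)
       let fin := (winList mi ni).foldl (fun st p => cellStep mi ni st p.1 p.2)
         (maps.map (fun s => s.toList), PySem.Dict.empty)
       let tally := fin.2.keys.foldl
         (fun (cm : Int × Int) k =>
           (cm.1 + ((fin.2.getD k PySem.Set.empty).length : Int),
            max cm.2 ((fin.2.getD k PySem.Set.empty).length : Int)))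
         (0, 0)
       [tally.1, tally.2]) := by
  simp only [solution]
  rw [nestedA]

lemma solution_alt_eq_fold (maps : List String) :
    solution_alt maps =
      (let mi : Int := maps.length
       let ni : Int := ((maps.getD 0 "").toList.length : Int)
       let adj := (winList mi ni).foldl (bstep (maps.map (fun s => s.toList)) mi ni)
         PySem.Dict.empty
       let lens : List Int := adj.values.map (fun s => (s.length : Int))
       [lens.sum, (PySem.List.max? lens (fun x => x)).getD 0]) := by
  simp only [solution_alt]
  rw [nestedB]

-- ===== VERDICT (by name: the statement is the Claim_ definition above) =====
lemma dmem_empty (k v : Char) : ¬ DMem PySem.Dict.empty k v := by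
  unfold DMem
  rw [PySem.Dict.getD_empty]
  simp [PySem.Set.empty]

theorem solution_spec : Claim_equal_solution := by
  intro maps _ hpre
  unfold Spec_solution
  obtain ⟨hne, hrows⟩ := hpre
  have h0 : maps.headD "" = maps.getD 0 "" := by
    cases maps with
    | nil => exact absurd rfl hne
    | cons m t => rfl
  have hg : GridOk (maps.map (fun s => s.toList)) ((maps.length : Nat) : Int)
      (((maps.getD 0 "").toList.length : Nat) : Int) := by
    constructor
    · simp
    · intro i hi
      rw [List.length_map] at hi
      have hrow : (maps.map (fun s => s.toList)).getD i [] = (maps.getD i "").toList := by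
        rw [List.getD_eq_getElem?_getD, List.getD_eq_getElem?_getD, List.getElem?_map]
        rw [List.getElem?_eq_getElem hi]
        simp
      rw [hrow, Int.toNat_natCast]
      have hmem : maps.getD i "" ∈ maps := by
        rw [List.getD_eq_getElem?_getD, List.getElem?_eq_getElem hi]
        exact List.getElem_mem hi
      have := hrows _ hmem
      rwa [h0] at this
  obtain ⟨hgoodB, hiffB⟩ := bfold_spec
    (g := maps.map (fun s => s.toList)) (mi := ((maps.length : Nat) : Int))
    (ni := (((maps.getD 0 "").toList.length : Nat) : Int))
    (winList ((maps.length : Nat) : Int) (((maps.getD 0 "").toList.length : Nat) : Int))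
    PySem.Dict.empty good_empty
  have hoA : OCore (maps.map (fun s => s.toList)) ((maps.length : Nat) : Int)
      (((maps.getD 0 "").toList.length : Nat) : Int)
      (maps.map (fun s => s.toList)) PySem.Dict.empty := by
    refine ⟨⟨rfl, fun _ => rfl⟩, fun p _ => Or.inl rfl, good_empty, ?_, ?_⟩
    · intro k v h
      exact absurd h (dmem_empty k v)
    · intro p _ h2 h3 _ _
      exact absurd h3 h2
  obtain ⟨⟨_, _, hgoodA, _, _⟩, _, _⟩ :=
    foldCells_spec hg
      (winList ((maps.length : Nat) : Int) (((maps.getD 0 "").toList.length : Nat) : Int))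
      (maps.map (fun s => s.toList)) PySem.Dict.empty hoA
      (fun p hp => mem_winList.mp hp)
  have hmm : ∀ k v,
      DMem ((winList ((maps.length : Nat) : Int) (((maps.getD 0 "").toList.length : Nat) : Int)).foldl
        (fun st p => cellStep ((maps.length : Nat) : Int)
          (((maps.getD 0 "").toList.length : Nat) : Int) st p.1 p.2)
        (maps.map (fun s => s.toList), PySem.Dict.empty)).2 k v ↔
      DMem ((winList ((maps.length : Nat) : Int) (((maps.getD 0 "").toList.length : Nat) : Int)).foldl
        (bstep (maps.map (fun s => s.toList)) ((maps.length : Nat) : Int)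
          (((maps.getD 0 "").toList.length : Nat) : Int)) PySem.Dict.empty) k v := by
    intro k v
    rw [afold_complete hg k v, hiffB k v, ← bpair_iff_rel]
    constructor
    · exact Or.inr
    · rintro (h | h)
      · exact absurd h (dmem_empty k v)
      · exact h
  have htal := tally_eq hgoodA hgoodB hmm
  rw [solution_eq_fold, solution_alt_eq_fold]
  simp only []
  rw [Prod.mk.injEq] at htal
  rw [htal.1, htal.2]
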